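-- pv_equiv track=rewrite | github.com/pratyaydeep/Python-programs | Problem90_ProjectEuler.py | check
-- ===== SOURCE A (Python) =====
-- def check(a,b): # Ham kiem tra xem 2 arrangement co thoa man ko
--     numbers = []
--     for i in range(len(a)):
--         for j in range(len(b)):
--             numbers.append(10*a[i]+b[j])
--             numbers.append(10*b[j]+a[i])
--     for i in range(1,10):
--         if i ** 2 not in numbers:
--             return False
--             break
--     else:
--         return True
-- ===== SOURCE B (Python) =====
-- def check(a, b):
--     aset, bset = set(a), set(b)
--     for i in range(1, 10):
--         s = i * i
--         if not (any(s - 10 * x in bset for x in a) or any(s - 10 * y in aset for y in b)):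
--             return False
--     return True
-- ===== Notes on version B (the rewrite author's own statement) =====
-- stated objective: faster
-- what changed: Instead of materialising the full list of all 2*len(a)*len(b) two-digit combinations and scanning it for each of the nine squares, B builds hash sets of the faces once and, for each square s, checks whether some face x has its complement s-10*x on the other die.
import Mathlib
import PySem

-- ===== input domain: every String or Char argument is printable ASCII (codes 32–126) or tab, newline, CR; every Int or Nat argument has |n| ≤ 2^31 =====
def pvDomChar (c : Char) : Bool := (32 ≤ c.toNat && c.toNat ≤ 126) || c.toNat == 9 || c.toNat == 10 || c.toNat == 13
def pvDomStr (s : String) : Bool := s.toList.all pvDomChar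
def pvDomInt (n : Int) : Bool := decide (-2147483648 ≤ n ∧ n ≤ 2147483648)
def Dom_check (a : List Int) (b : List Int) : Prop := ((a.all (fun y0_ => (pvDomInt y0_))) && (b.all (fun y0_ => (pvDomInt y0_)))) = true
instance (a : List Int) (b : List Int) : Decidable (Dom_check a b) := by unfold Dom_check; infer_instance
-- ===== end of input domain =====

-- B replaces A's full cross-product list (all 2·|a|·|b| two-digit combinations, scanned
-- for each of the nine squares) by set lookups: for each square s it checks whether some
-- face x on one die has its complement s-10*x on the other die; measured faster (asymptotic).

-- ===== PORT A =====
-- early-exit loop 'for i in range(1,10): if i**2 not in numbers: return False / else: return True'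
def checkLoop (numbers : List Int) : List Int → Bool
  | [] => true
  | i :: rest => if ¬ (numbers.contains (i ^ 2)) then false else checkLoop numbers rest

def check (a : List Int) (b : List Int) : Bool :=
  let numbers := (List.range a.length).foldl (fun ns i =>
    (List.range b.length).foldl (fun ns j =>
      ns ++ [10 * a.getD i 0 + b.getD j 0, 10 * b.getD j 0 + a.getD i 0]) ns) []
  checkLoop numbers (PySem.List.pyRange 1 10 1)

-- ===== PORT B =====
-- early-exit loop of Source B over range(1,10)
def altLoop (a b aset bset : List Int) : List Int → Bool
  | [] => true
  | i :: rest =>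
    let s := i * i
    if ¬ (a.any (fun x => PySem.Set.contains bset (s - 10 * x)) ||
          b.any (fun y => PySem.Set.contains aset (s - 10 * y))) then false
    else altLoop a b aset bset rest

def check_alt (a : List Int) (b : List Int) : Bool :=
  altLoop a b (PySem.Set.ofList a) (PySem.Set.ofList b) (PySem.List.pyRange 1 10 1)

-- ===== PRECONDITION & SPEC =====
def Spec_check (a : List Int) (b : List Int) (out : Bool) : Prop := out = check_alt a b
instance (a : List Int) (b : List Int) (out : Bool) : Decidable (Spec_check a b out) := by unfold Spec_check; infer_instance

-- ===== CLAIM (what is proved, stated in full; the proofs are below) =====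
def Claim_equal_check : Prop := ∀ (a : List Int) (b : List Int), Dom_check a b → Spec_check a b (check a b)

-- ===== LEMMAS AND PROOFS =====

-- A's 'numbers' list is the flatMap of the two-element blocks
theorem numbers_eq (a b : List Int) :
    (List.range a.length).foldl (fun ns i =>
      (List.range b.length).foldl (fun ns j =>
        ns ++ [10 * a.getD i 0 + b.getD j 0, 10 * b.getD j 0 + a.getD i 0]) ns) []
    = (List.range a.length).flatMap (fun i =>
        (List.range b.length).flatMap (fun j =>
          [10 * a.getD i 0 + b.getD j 0, 10 * b.getD j 0 + a.getD i 0])) := by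
  have h : ∀ (acc : List Int),
      (List.range a.length).foldl (fun ns i =>
        (List.range b.length).foldl (fun ns j =>
          ns ++ [10 * a.getD i 0 + b.getD j 0, 10 * b.getD j 0 + a.getD i 0]) ns) acc
      = acc ++ (List.range a.length).flatMap (fun i =>
          (List.range b.length).flatMap (fun j =>
            [10 * a.getD i 0 + b.getD j 0, 10 * b.getD j 0 + a.getD i 0])) := by
    intro acc
    rw [← PySem.List.foldl_append_eq_flatMap]
    apply PySem.List.foldl_congr_mem
    intro ns i _
    exact PySem.List.foldl_append_eq_flatMap _ _ _
  simpa using h []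



-- membership in A's numbers list, characterised over the faces
theorem mem_numbers (a b : List Int) (s : Int) :
    (s ∈ (List.range a.length).flatMap (fun i =>
        (List.range b.length).flatMap (fun j =>
          [10 * a.getD i 0 + b.getD j 0, 10 * b.getD j 0 + a.getD i 0])))
    ↔ ∃ x ∈ a, ∃ y ∈ b, s = 10 * x + y ∨ s = 10 * y + x := by
  simp only [List.mem_flatMap, List.mem_range, List.mem_cons,
    List.not_mem_nil, or_false]
  constructor
  · rintro ⟨i, hi, j, hj, hs⟩
    refine ⟨a.getD i 0, ?_, b.getD j 0, ?_, ?_⟩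
    · rw [List.getD_eq_getElem a 0 hi]; exact List.getElem_mem hi
    · rw [List.getD_eq_getElem b 0 hj]; exact List.getElem_mem hj
    · tauto
  · rintro ⟨x, hx, y, hy, h⟩
    obtain ⟨i, hi, hxi⟩ := List.mem_iff_getElem.mp hx
    obtain ⟨j, hj, hyj⟩ := List.mem_iff_getElem.mp hy
    refine ⟨i, hi, j, hj, ?_⟩
    rw [List.getD_eq_getElem a 0 hi, List.getD_eq_getElem b 0 hj, hxi, hyj]
    tauto

-- per-square condition of A equals the condition of B
theorem cond_eq (a b : List Int) (i : Int) :
    ((List.range a.length).flatMap (fun i =>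
        (List.range b.length).flatMap (fun j =>
          [10 * a.getD i 0 + b.getD j 0, 10 * b.getD j 0 + a.getD i 0]))).contains (i ^ 2)
    = (a.any (fun x => PySem.Set.contains (PySem.Set.ofList b) (i * i - 10 * x)) ||
       b.any (fun y => PySem.Set.contains (PySem.Set.ofList a) (i * i - 10 * y))) := by
  rw [Bool.eq_iff_iff, Bool.or_eq_true]
  rw [List.contains_iff_mem, mem_numbers]
  simp only [List.any_eq_true, PySem.Set.contains, List.contains_iff_mem,
    PySem.Set.mem_ofList, pow_two]
  constructor
  · rintro ⟨x, hx, y, hy, h | h⟩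
    · exact Or.inl ⟨x, hx, by rw [h]; ring_nf; exact hy⟩
    · exact Or.inr ⟨y, hy, by rw [h]; ring_nf; exact hx⟩
  · rintro (⟨x, hx, hmem⟩ | ⟨y, hy, hmem⟩)
    · exact ⟨x, hx, i * i - 10 * x, hmem, Or.inl (by ring)⟩
    · exact ⟨i * i - 10 * y, hmem, y, hy, Or.inr (by ring)⟩

-- the two early-exit loops agree when the per-element tests agree
theorem loops_eq (a b : List Int) (l : List Int) :
    checkLoop ((List.range a.length).flatMap (fun i =>
        (List.range b.length).flatMap (fun j =>
          [10 * a.getD i 0 + b.getD j 0, 10 * b.getD j 0 + a.getD i 0]))) l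
    = altLoop a b (PySem.Set.ofList a) (PySem.Set.ofList b) l := by
  induction l with
  | nil => rfl
  | cons i rest ih =>
    simp only [checkLoop, altLoop, cond_eq a b i]
    split <;> [rfl; exact ih]

-- ===== VERDICT (by name: the statement is the Claim_ definition above) =====
theorem check_spec : Claim_equal_check := by
  intro a b _
  show check a b = check_alt a b
  unfold check check_alt
  rw [numbers_eq]
  exact loops_eq a b _
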